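-- pv_equiv track=rewrite | github.com/Dilrevx/ROM-crawlers | scripts/google/dlmgr.py | pickUpDlLink
-- ===== SOURCE A (Python) =====
-- from typing import Dict, List
--
-- def pickUpDlLink(dlList: List[Dict[str, str]]) -> List[Dict]:
--     '''
--     Maybe duplicate
--     '''
--     occuredVersion = set()
--     lastOccuredEntry = {}
--
--     ret = []
--     for entry in dlList:
--         version = entry["Version"]
--         link = entry["Download"]
--
--         version = version.split(" ")[0]
--         if version not in occuredVersion:
--             ret.append(lastOccuredEntry)
--             ret.append(entry)
--
--         occuredVersion.add(version)
--         lastOccuredEntry = entry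
--     return ret[1:]
-- ===== SOURCE B (Python) =====
-- def pickUpDlLink(dlList):
--     # Index-table decomposition: first record the index of the first occurrence
--     # of each split-version, then emit boundary pairs from those indices.
--     seen = set()
--     firsts = []
--     for i, entry in enumerate(dlList):
--         v = entry["Version"]
--         _ = entry["Download"]
--         v = v.split(" ")[0]
--         if v not in seen:
--             seen.add(v)
--             firsts.append(i)
--     out = []
--     for i in firsts:
--         if i == 0:
--             out.append(dlList[0])
--         else:
--             out.append(dlList[i - 1])
--             out.append(dlList[i])
--     return out
-- ===== Notes on version B (the rewrite author's own statement) =====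
-- stated objective: alternative
-- what changed: Replaces A's rolling previous-entry/{}-sentinel accumulation followed by a [1:] slice with a two-pass scheme: one pass records the index of each version's first occurrence, a second pass emits dlList[i-1], dlList[i] boundary pairs (just dlList[0] for the first index) directly.
import Mathlib
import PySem

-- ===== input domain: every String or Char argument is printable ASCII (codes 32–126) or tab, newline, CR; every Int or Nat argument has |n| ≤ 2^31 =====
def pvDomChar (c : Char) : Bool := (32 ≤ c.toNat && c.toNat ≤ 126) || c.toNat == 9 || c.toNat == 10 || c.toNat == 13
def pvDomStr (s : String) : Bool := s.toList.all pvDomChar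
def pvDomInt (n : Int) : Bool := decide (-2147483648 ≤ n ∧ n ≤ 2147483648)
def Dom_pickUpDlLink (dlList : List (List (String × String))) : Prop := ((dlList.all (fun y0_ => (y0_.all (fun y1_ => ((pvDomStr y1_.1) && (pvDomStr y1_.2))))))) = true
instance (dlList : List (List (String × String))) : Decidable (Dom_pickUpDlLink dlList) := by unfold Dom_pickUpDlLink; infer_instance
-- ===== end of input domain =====

-- B replaces A's rolling previous-entry/{}-sentinel accumulation + [1:] slice by a
-- first-occurrence index table and a separate boundary-pair emit pass (alternative decomposition, same cost).

-- ===== PORT A =====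
-- entry["Version"] is first-match lookup in the association list; Pre_ guarantees the key
-- is present, so the KeyError case (lookup = none) never occurs and .getD "" is exact there.
-- version.split(" ")[0]: sep " " ≠ "" so split? is some and the result is nonempty; [0] = headD "".
-- ret[1:] with nonnegative start is List.drop 1 (exact).
def pickUpDlLink (dlList : List (List (String × String))) : List (List (String × String)) :=
  let step := fun (st : PySem.Set String × List (String × String) × List (List (String × String)))
                  (entry : List (String × String)) =>
    let occuredVersion := st.1
    let lastOccuredEntry := st.2.1
    let ret := st.2.2
    let version := (List.lookup "Version" entry).getD ""
    let _link := (List.lookup "Download" entry).getD ""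
    let version := (((PySem.Str.split? version " ").getD []).headD "")
    let ret := if PySem.Set.contains occuredVersion version then ret else ret ++ [lastOccuredEntry, entry]
    (PySem.Set.add occuredVersion version, entry, ret)
  ((dlList.foldl step (PySem.Set.empty, ([], []))).2.2).drop 1

-- ===== PORT B =====
-- Same lookup/split conventions as in port A (Pre_ guarantees both keys; sep " " ≠ "").
-- dlList[i] / dlList[i-1] are only reached with in-range nonnegative i, so pyGetD is exact.
def pickUpDlLink_alt (dlList : List (List (String × String))) : List (List (String × String)) :=
  let pass1 := fun (st : PySem.Set String × List Int) (p : Int × List (String × String)) =>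
    let v := (List.lookup "Version" p.2).getD ""
    let _link := (List.lookup "Download" p.2).getD ""
    let v := (((PySem.Str.split? v " ").getD []).headD "")
    if PySem.Set.contains st.1 v then st else (PySem.Set.add st.1 v, st.2 ++ [p.1])
  let firsts := ((PySem.List.enumerate dlList).foldl pass1 (PySem.Set.empty, [])).2
  firsts.foldl (fun out i =>
    if i = 0 then out ++ [PySem.List.pyGetD dlList 0 []]
    else out ++ [PySem.List.pyGetD dlList (i - 1) [], PySem.List.pyGetD dlList i []]) []

-- ===== PRECONDITION & SPEC =====
-- Pre_ excludes exactly the inputs on which Python A raises KeyError: an entry missing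
-- the "Version" or "Download" key.
def Pre_pickUpDlLink (dlList : List (List (String × String))) : Prop :=
  ∀ e ∈ dlList, (List.lookup "Version" e).isSome ∧ (List.lookup "Download" e).isSome
instance (dlList : List (List (String × String))) : Decidable (Pre_pickUpDlLink dlList) := by
  unfold Pre_pickUpDlLink; infer_instance
def pvWitness_pickUpDlLink : (List (List (String × String))) :=
  [[("Version", "1.0 beta"), ("Download", "http://x")],
   [("Version", "1.0 final"), ("Download", "http://y")],
   [("Version", "2.0"), ("Download", "http://z")]]

def Spec_pickUpDlLink (dlList : List (List (String × String))) (out : List (List (String × String))) : Prop := out = pickUpDlLink_alt dlList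
instance (dlList : List (List (String × String))) (out : List (List (String × String))) : Decidable (Spec_pickUpDlLink dlList out) := by unfold Spec_pickUpDlLink; infer_instance

-- ===== CLAIM (what is proved, stated in full; the proofs are below) =====
def Claim_equal_pickUpDlLink : Prop := ∀ (dlList : List (List (String × String))), Dom_pickUpDlLink dlList → Pre_pickUpDlLink dlList → Spec_pickUpDlLink dlList (pickUpDlLink dlList)


-- ===== LEMMAS AND PROOFS =====

-- the split-version key both programs compute for an entry
def pvKey (e : List (String × String)) : String :=
  (((PySem.Str.split? ((List.lookup "Version" e).getD "") " ").getD []).headD "")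

-- A's loop body (definitionally equal to the lambda in pickUpDlLink)
def pvStepA (st : PySem.Set String × List (String × String) × List (List (String × String)))
    (entry : List (String × String)) :
    PySem.Set String × List (String × String) × List (List (String × String)) :=
  (PySem.Set.add st.1 (pvKey entry), entry,
    if PySem.Set.contains st.1 (pvKey entry) = true then st.2.2 else st.2.2 ++ [st.2.1, entry])

-- B's first-pass body (definitionally equal to the lambda in pickUpDlLink_alt)
def pvStepB (st : PySem.Set String × List Int) (p : Int × List (String × String)) :
    PySem.Set String × List Int :=
  if PySem.Set.contains st.1 (pvKey p.2) = true then st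
  else (PySem.Set.add st.1 (pvKey p.2), st.2 ++ [p.1])

-- B's second-pass body (definitionally equal to the lambda in pickUpDlLink_alt)
def pvEmitStep (L : List (List (String × String))) (out : List (List (String × String))) (i : Int) :
    List (List (String × String)) :=
  if i = 0 then out ++ [PySem.List.pyGetD L 0 []]
  else out ++ [PySem.List.pyGetD L (i - 1) [], PySem.List.pyGetD L i []]

-- what A's loop appends after the first iteration: for each still-unseen version, the
-- previous entry and the current one
def pvEmitA (xs : List (List (String × String))) (occ : PySem.Set String)
    (last : List (String × String)) : List (List (String × String)) :=
  match xs with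
  | [] => []
  | e :: xs =>
    (if PySem.Set.contains occ (pvKey e) = true then [] else [last, e]) ++
      pvEmitA xs (PySem.Set.add occ (pvKey e)) e

-- the indices B's first pass collects, scanning xs with indices starting at s
def pvFirsts (xs : List (List (String × String))) (s : Int) (occ : PySem.Set String) : List Int :=
  match xs with
  | [] => []
  | e :: xs =>
    (if PySem.Set.contains occ (pvKey e) = true then [] else [s]) ++
      pvFirsts xs (s + 1) (PySem.Set.add occ (pvKey e))

-- what B's second pass emits for one index
def pvEmit1 (L : List (List (String × String))) (i : Int) : List (List (String × String)) :=
  if i = 0 then [PySem.List.pyGetD L 0 []]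
  else [PySem.List.pyGetD L (i - 1) [], PySem.List.pyGetD L i []]

theorem pvFoldA (xs : List (List (String × String))) (occ : PySem.Set String)
    (last : List (String × String)) (ret : List (List (String × String))) :
    (xs.foldl pvStepA (occ, (last, ret))).2.2 = ret ++ pvEmitA xs occ last := by
  induction xs generalizing occ last ret with
  | nil => simp [pvEmitA]
  | cons e xs ih =>
    rw [List.foldl_cons]
    have hs : pvStepA (occ, (last, ret)) e
        = (PySem.Set.add occ (pvKey e), (e,
            if PySem.Set.contains occ (pvKey e) = true then ret else ret ++ [last, e])) := rfl
    rw [hs]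
    simp only [pvEmitA]
    by_cases h : PySem.Set.contains occ (pvKey e) = true
    · rw [if_pos h, if_pos h, ih, List.nil_append]
    · rw [if_neg h, if_neg h, ih, List.append_assoc]

theorem pvFoldB1 (xs : List (List (String × String))) (s : Int) (occ : PySem.Set String)
    (fs : List Int) :
    ((PySem.List.enumerate xs s).foldl pvStepB (occ, fs)).2 = fs ++ pvFirsts xs s occ := by
  induction xs generalizing s occ fs with
  | nil => simp [pvFirsts, PySem.List.enumerate_nil]
  | cons e xs ih =>
    rw [PySem.List.enumerate_cons, List.foldl_cons]
    have hs : pvStepB (occ, fs) (s, e)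
        = if PySem.Set.contains occ (pvKey e) = true then (occ, fs)
          else (PySem.Set.add occ (pvKey e), fs ++ [s]) := rfl
    rw [hs]
    simp only [pvFirsts]
    by_cases h : PySem.Set.contains occ (pvKey e) = true
    · have hadd : PySem.Set.add occ (pvKey e) = occ := by
        unfold PySem.Set.add; rw [if_pos h]
      rw [if_pos h, if_pos h, ih, hadd, List.nil_append]
    · rw [if_neg h, if_neg h, ih, List.append_assoc, List.singleton_append]

theorem pvFoldB2 (L : List (List (String × String))) (fs : List Int)
    (out : List (List (String × String))) :
    fs.foldl (pvEmitStep L) out = out ++ fs.flatMap (pvEmit1 L) := by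
  induction fs generalizing out with
  | nil => simp
  | cons i fs ih =>
    rw [List.foldl_cons]
    have hs : pvEmitStep L out i = out ++ pvEmit1 L i := by
      by_cases h : i = 0 <;> simp [pvEmitStep, pvEmit1, h]
    rw [hs, ih, List.flatMap_cons, List.append_assoc]

theorem pvGetD_drop (L : List (List (String × String))) (k : Nat) (e : List (String × String))
    (xs : List (List (String × String))) (h : L.drop k = e :: xs) :
    PySem.List.pyGetD L (k : Int) [] = e := by
  have h9 : L[k]? = some e := by
    have h1 := congrArg (fun t : List (List (String × String)) => t[0]?) h
    simpa [List.getElem?_drop] using h1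
  rw [PySem.List.pyGetD_natCast]
  simp [List.getD_eq_getElem?_getD, h9]

-- core invariant: with xs the suffix of L starting at k ≥ 1 and last = L[k-1],
-- A's remaining appends equal B's emitted pairs for the remaining first-occurrence indices
theorem pvMain (L : List (List (String × String))) (xs : List (List (String × String)))
    (k : Nat) (occ : PySem.Set String) (last : List (String × String))
    (hk : 1 ≤ k) (hdrop : L.drop k = xs) (hlast : PySem.List.pyGetD L ((k : Int) - 1) [] = last) :
    pvEmitA xs occ last = (pvFirsts xs (k : Int) occ).flatMap (pvEmit1 L) := by
  induction xs generalizing k occ last with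
  | nil => simp [pvEmitA, pvFirsts]
  | cons e xs ih =>
    have he : PySem.List.pyGetD L (k : Int) [] = e := pvGetD_drop L k e xs hdrop
    have hdrop' : L.drop (k + 1) = xs := by
      have h1 := congrArg (List.drop 1) hdrop
      simpa [List.drop_drop, Nat.add_comm] using h1
    have hlast' : PySem.List.pyGetD L (((k + 1 : Nat) : Int) - 1) [] = e := by
      have hc : ((k + 1 : Nat) : Int) - 1 = (k : Int) := by push_cast; ring
      rw [hc]; exact he
    have hrec := ih (k + 1) (PySem.Set.add occ (pvKey e)) e (by omega) hdrop' hlast'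
    have hcast : ((k + 1 : Nat) : Int) = (k : Int) + 1 := by push_cast; ring
    rw [hcast] at hrec
    simp only [pvEmitA, pvFirsts]
    by_cases h : PySem.Set.contains occ (pvKey e) = true
    · rw [if_pos h, if_pos h, List.nil_append, List.nil_append, hrec]
    · have hk0 : (k : Int) ≠ 0 := by
        have : (0 : Int) < (k : Int) := by exact_mod_cast hk
        omega
      have h1 : pvEmit1 L (k : Int) = [last, e] := by
        unfold pvEmit1; rw [if_neg hk0, hlast, he]
      rw [if_neg h, if_neg h, List.singleton_append, List.flatMap_cons, h1, hrec]

-- ===== VERDICT (by name: the statement is the Claim_ definition above) =====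
theorem pickUpDlLink_spec : Claim_equal_pickUpDlLink := by
  intro dlList _hDom _hPre
  unfold Spec_pickUpDlLink
  have hA : pickUpDlLink dlList
      = ((dlList.foldl pvStepA (PySem.Set.empty, ([], []))).2.2).drop 1 := rfl
  have hB : pickUpDlLink_alt dlList
      = (((PySem.List.enumerate dlList).foldl pvStepB (PySem.Set.empty, [])).2).foldl
          (pvEmitStep dlList) [] := rfl
  rw [hA, hB]
  cases dlList with
  | nil => rfl
  | cons e0 rest =>
    have hs0 : pvStepA (PySem.Set.empty, ([], [])) e0
        = (PySem.Set.add PySem.Set.empty (pvKey e0), (e0, ([[], e0] : List (List (String × String))))) := rfl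
    have hs1 : pvStepB (PySem.Set.empty, []) (0, e0)
        = (PySem.Set.add PySem.Set.empty (pvKey e0), ([0] : List Int)) := rfl
    have h0 : PySem.List.pyGetD (e0 :: rest) (0 : Int) [] = e0 := by
      have hc : (0 : Int) = ((0 : Nat) : Int) := by norm_num
      rw [hc]; exact pvGetD_drop (e0 :: rest) 0 e0 rest rfl
    have hdrop1 : (e0 :: rest).drop 1 = rest := rfl
    have hlast1 : PySem.List.pyGetD (e0 :: rest) (((1 : Nat) : Int) - 1) [] = e0 := by
      have hc : ((1 : Nat) : Int) - 1 = (0 : Int) := by norm_num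
      rw [hc]; exact h0
    have hmain := pvMain (e0 :: rest) rest 1 (PySem.Set.add PySem.Set.empty (pvKey e0)) e0
      (le_refl 1) hdrop1 hlast1
    have hone : ((1 : Nat) : Int) = (0 : Int) + 1 := by norm_num
    rw [hone] at hmain
    have h2 : pvEmit1 (e0 :: rest) 0 = [e0] := by
      unfold pvEmit1; rw [if_pos rfl, h0]
    rw [List.foldl_cons, hs0, pvFoldA, PySem.List.enumerate_cons, List.foldl_cons, hs1, pvFoldB1,
      pvFoldB2]
    have hdropstep : ∀ z : List (List (String × String)),
        (([[], e0] : List (List (String × String))) ++ z).drop 1 = e0 :: z := fun z => rfl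
    rw [hdropstep, hmain, List.nil_append, List.singleton_append, List.flatMap_cons, h2,
      List.singleton_append]
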